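-- pv_equiv track=rewrite | github.com/Longtermhealth/longtermhealth-recommendations | scheduling/scheduler.py | reorder_by_primary_muscle
-- ===== SOURCE A (Python) =====
-- def get_primary_muscle(routine):
--     """
--     Extracts the primary muscle group from a routine.
--     Assumes the 'title' field in the routine's resources is a string like:
--       "abs (primary), obliques (secondary), hip abductors (secondary), ..."
--     """
--     tags = routine.get('attributes', {}).get('muscleTags')
--     if isinstance(tags, str):
--         parts = tags.split(',')
--         if parts:
--             primary_part = parts[0].strip()
--             primary = primary_part.split('(')[0].strip()
--             return primary
--     return None
--
-- def reorder_by_primary_muscle(routines):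
--     """
--     Reorders a list of routines so that routines with the same primary muscle
--     are not scheduled directly one after the other if alternatives exist.
--
--     If no alternative is available, routines with the same primary muscle will be placed consecutively.
--     """
--     if not routines:
--         return routines
--
--     # We'll work with a copy of the list.
--     pool = routines.copy()
--     result = []
--
--     # Start with the first candidate.
--     result.append(pool.pop(0))
--
--     # Greedy algorithm: at each step, try to pick a routine from the pool whose primary muscle
--     # is different from the one last added.
--     while pool:
--         last_primary = get_primary_muscle(result[-1])
--         candidate_index = None
--         for i, candidate in enumerate(pool):
--             if get_primary_muscle(candidate) != last_primary:
--                 candidate_index = i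
--                 break
--         if candidate_index is not None:
--             result.append(pool.pop(candidate_index))
--         else:
--             # No alternative found; take the first candidate even if it has the same primary muscle.
--             result.append(pool.pop(0))
--     return result
-- ===== SOURCE B (Python) =====
-- def _primary(routine):
--     tags = routine.get('attributes', {}).get('muscleTags')
--     if isinstance(tags, str):
--         parts = tags.split(',')
--         if parts:
--             return parts[0].strip().split('(')[0].strip()
--     return None
--
-- def reorder_by_primary_muscle(routines):
--     """Greedy reorder avoiding equal adjacent primary muscles, via per-muscle
--     FIFO index queues: primaries are computed once, and each step takes the
--     minimum queue front among muscles different from the last (falling back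
--     to the last muscle's own queue)."""
--     if not routines:
--         return routines
--     prims = [_primary(r) for r in routines]
--     queues = {}
--     for i, p in enumerate(prims):
--         queues.setdefault(p, []).append(i)
--     first = queues[prims[0]].pop(0)
--     result = [routines[first]]
--     last = prims[first]
--     for _ in range(len(routines) - 1):
--         best = None
--         for p, q in queues.items():
--             if p != last and q and (best is None or q[0] < best):
--                 best = q[0]
--         if best is None:
--             best = queues[last][0]
--         queues[prims[best]].pop(0)
--         result.append(routines[best])
--         last = prims[best]
--     return result
-- ===== Notes on version B (the rewrite author's own statement) =====
-- stated objective: alternative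
-- what changed: B computes each routine's primary muscle once and keeps per-muscle FIFO index queues, picking each step's routine as the minimum queue front among muscles different from the last, instead of A's rescan of the whole remaining pool with the primary re-parsed from the tag string on every comparison.
import Mathlib
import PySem

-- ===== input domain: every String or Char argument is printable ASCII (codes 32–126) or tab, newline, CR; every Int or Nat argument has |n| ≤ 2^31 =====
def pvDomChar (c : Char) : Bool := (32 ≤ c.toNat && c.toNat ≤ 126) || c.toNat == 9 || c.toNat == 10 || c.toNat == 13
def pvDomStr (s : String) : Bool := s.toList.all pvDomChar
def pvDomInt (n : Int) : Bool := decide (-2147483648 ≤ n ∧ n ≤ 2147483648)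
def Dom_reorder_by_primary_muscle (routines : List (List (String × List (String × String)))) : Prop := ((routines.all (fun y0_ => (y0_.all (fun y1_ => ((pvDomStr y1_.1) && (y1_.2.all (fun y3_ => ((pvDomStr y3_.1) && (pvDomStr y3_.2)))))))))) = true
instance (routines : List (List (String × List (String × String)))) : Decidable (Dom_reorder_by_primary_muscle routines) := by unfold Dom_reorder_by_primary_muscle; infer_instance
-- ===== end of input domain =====

-- B replaces A's rescan-the-pool greedy by per-muscle FIFO index queues with
-- primaries computed once; same return value, objective: alternative algorithm.

-- ===== PORT A =====

-- get_primary_muscle: parse the primary muscle out of attributes["muscleTags"]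
def get_primary_muscle (routine : List (String × List (String × String))) : Option String :=
  match PySem.Dict.get? (PySem.Dict.mk ((PySem.Dict.mk routine).getD "attributes" [])) "muscleTags" with
  | some tags =>
    -- tags.split(',') ; ',' ≠ "" so split? always returns some
    let parts := (PySem.Str.split? tags ",").getD []
    match parts with
    | [] => none     -- mirrors `if parts:` (unreachable: split never yields [])
    | p0 :: _ =>
      -- parts[0].strip().split('(')[0].strip() ; split never yields [] so [0] is headD
      some (PySem.Str.strip (((PySem.Str.split? (PySem.Str.strip p0) "(").getD []).headD ""))
  | none => none

-- the inner `for i, candidate in enumerate(pool): … break` + `pool.pop(candidate_index)`: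
-- first element satisfying p, together with the pool with that element removed
def removeAlt {α : Type} (p : α → Bool) : List α → Option (α × List α)
  | [] => none
  | c :: cs =>
    if p c then some (c, cs)
    else match removeAlt p cs with
      | some (x, rest) => some (x, c :: rest)
      | none => none

theorem removeAlt_length {α : Type} (p : α → Bool) :
    ∀ (l : List α) (c : α) (rest : List α), removeAlt p l = some (c, rest) → rest.length + 1 = l.length := by
  intro l
  induction l with
  | nil => intro c rest h; simp [removeAlt] at h
  | cons x xs ih =>
    intro c rest h
    by_cases hp : p x
    · simp [removeAlt, hp] at h
      simp [← h.1, ← h.2]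
    · simp only [removeAlt, hp, if_neg, Bool.false_eq_true, if_false] at h
      cases hrec : removeAlt p xs with
      | none => rw [hrec] at h; simp at h
      | some cr =>
        rw [hrec] at h
        simp at h
        obtain ⟨h1, h2⟩ := h
        have := ih cr.1 cr.2 (by rw [hrec])
        simp [← h2, List.length_cons]
        omega

-- the `while pool:` greedy loop of A
def loopA (lastR : List (String × List (String × String)))
    (pool : List (List (String × List (String × String)))) :
    List (List (String × List (String × String))) :=
  match hrm : removeAlt (fun c => get_primary_muscle c != get_primary_muscle lastR) pool with
  | some (c, rest) => c :: loopA c rest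
  | none =>
    match pool with
    | [] => []
    | p :: ps => p :: loopA p ps
termination_by pool.length
decreasing_by
  · have := removeAlt_length _ pool c rest hrm
    omega
  · simp

def reorder_by_primary_muscle (routines : List (List (String × List (String × String)))) :
    List (List (String × List (String × String))) :=
  match routines with
  | [] => routines
  | r :: rest => r :: loopA r rest

-- ===== PORT B =====

-- Source B's _primary is the same extraction as A's helper, so its port shares
-- get_primary_muscle (B computes it once per routine)

-- `for p, q in queues.items(): if p != last and q and (best is None or q[0] < best): best = q[0]`
def pvBestFold (last : Option String) (items : List (Option String × List Int)) : Option Int :=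
  items.foldl (fun best pq =>
    if pq.1 != last then
      match pq.2, best with
      | q0 :: _, none => some q0
      | q0 :: _, some b => if q0 < b then some q0 else some b
      | [], _ => best
    else best) none

-- the `for _ in range(len(routines) - 1):` loop; the counter value is unused in Source B,
-- so it is rendered as a Nat countdown of the same number of iterations
def pvLoopB (routines : List (List (String × List (String × String))))
    (prims : List (Option String)) :
    Nat → PySem.Dict (Option String) (List Int) × Option String × List (List (String × List (String × String)))
    → List (List (String × List (String × String)))
  | 0, st => st.2.2
  | Nat.succ m, (queues, last, result) =>
    let best : Int :=
      match pvBestFold last queues.items with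
      | some b => b
      | none => (queues.getD last []).headD 0   -- queues[last][0]; nonempty in every reachable state
    let p := PySem.List.pyGetD prims best none
    pvLoopB routines prims m
      (queues.modify p [] (List.drop 1), p, result ++ [PySem.List.pyGetD routines best []])

def reorder_by_primary_muscle_alt (routines : List (List (String × List (String × String)))) :
    List (List (String × List (String × String))) :=
  match routines with
  | [] => routines
  | _ :: _ =>
    let prims := routines.map get_primary_muscle
    -- queues.setdefault(p, []).append(i) over enumerate(prims)
    let queues := (PySem.List.enumerate prims).foldl
      (fun d ip => d.modify ip.2 [] (fun q => q ++ [ip.1])) PySem.Dict.empty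
    let p0 := prims.headD none
    let first : Int := (queues.getD p0 []).headD 0   -- queues[prims[0]].pop(0); nonempty by construction
    let queues := queues.modify p0 [] (List.drop 1)
    pvLoopB routines prims (routines.length - 1)
      (queues, PySem.List.pyGetD prims first none, [PySem.List.pyGetD routines first []])

-- ===== PRECONDITION & SPEC =====
def Spec_reorder_by_primary_muscle (routines : List (List (String × List (String × String)))) (out : List (List (String × List (String × String)))) : Prop := out = reorder_by_primary_muscle_alt routines
instance (routines : List (List (String × List (String × String)))) (out : List (List (String × List (String × String)))) : Decidable (Spec_reorder_by_primary_muscle routines out) := by unfold Spec_reorder_by_primary_muscle; infer_instance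

-- ===== CLAIM (what is proved, stated in full; the proofs are below) =====
def Claim_equal_reorder_by_primary_muscle : Prop := ∀ (routines : List (List (String × List (String × String)))), Dom_reorder_by_primary_muscle routines → Spec_reorder_by_primary_muscle routines (reorder_by_primary_muscle routines)

-- ===== LEMMAS AND PROOFS =====

-- ---------- abbreviations used only by the proofs ----------
abbrev PVR : Type := List (String × List (String × String))

-- ---------- generic facts about removeAlt ----------

theorem removeAlt_congr {α : Type} {p p' : α → Bool} :
    ∀ {l : List α}, (∀ x ∈ l, p x = p' x) → removeAlt p l = removeAlt p' l := by
  intro l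
  induction l with
  | nil => intro _; rfl
  | cons x xs ih =>
    intro h
    have hx : p x = p' x := h x (by simp)
    have hxs := ih (fun y hy => h y (by simp [hy]))
    simp only [removeAlt, hx, hxs]

theorem removeAlt_map {α β : Type} (p : β → Bool) (f : α → β) :
    ∀ (l : List α), removeAlt p (l.map f)
      = (removeAlt (fun x => p (f x)) l).map (fun cr => (f cr.1, cr.2.map f)) := by
  intro l
  induction l with
  | nil => rfl
  | cons x xs ih =>
    by_cases hp : p (f x)
    · simp [removeAlt, hp]
    · simp only [List.map_cons, removeAlt, hp, Bool.false_eq_true, if_false, ih]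
      cases removeAlt (fun x => p (f x)) xs <;> simp

theorem removeAlt_none_iff {α : Type} (p : α → Bool) :
    ∀ {l : List α}, removeAlt p l = none ↔ ∀ x ∈ l, p x = false := by
  intro l
  induction l with
  | nil => simp [removeAlt]
  | cons x xs ih =>
    by_cases hp : p x
    · simp [removeAlt, hp]
    · simp only [removeAlt, hp, Bool.false_eq_true, if_false]
      cases h : removeAlt p xs with
      | none =>
        simp only [h, true_iff] at ih ⊢
        intro y hy
        rcases List.mem_cons.mp hy with rfl | hy'
        · simpa using hp
        · exact ih y hy'
      | some cr =>
        constructor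
        · intro hc; simp at hc
        · intro hall
          exfalso
          have : removeAlt p xs = none := ih.mpr (fun y hy => hall y (by simp [hy]))
          simp [h] at this

theorem removeAlt_some_spec {α : Type} [BEq α] [LawfulBEq α] (p : α → Bool) :
    ∀ {l : List α} {c : α} {rest : List α}, removeAlt p l = some (c, rest) →
      c ∈ l ∧ p c = true ∧ rest = l.erase c := by
  intro l
  induction l with
  | nil => intro c rest h; simp [removeAlt] at h
  | cons x xs ih =>
    intro c rest h
    by_cases hp : p x
    · simp only [removeAlt, hp, if_true, Option.some.injEq, Prod.mk.injEq] at h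
      obtain ⟨rfl, rfl⟩ := h
      exact ⟨by simp, hp, (List.erase_cons_head _ _).symm⟩
    · simp only [removeAlt, hp, Bool.false_eq_true, if_false] at h
      cases hrec : removeAlt p xs with
      | none => rw [hrec] at h; simp at h
      | some cr =>
        rw [hrec] at h
        obtain ⟨c', r'⟩ := cr
        simp only [Option.some.injEq, Prod.mk.injEq] at h
        obtain ⟨h1, h2⟩ := h
        subst h1
        subst h2
        obtain ⟨hmem, hpc, hrest⟩ := ih hrec
        have hxc : ¬((x == c') = true) := by
          intro hbeq
          have hxeq : x = c' := by simpa using hbeq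
          rw [hxeq] at hp; exact hp hpc
        refine ⟨by simp [hmem], hpc, ?_⟩
        rw [List.erase_cons_tail hxc, hrest]

theorem removeAlt_some_min {p : Int → Bool} :
    ∀ {l : List Int} {c : Int} {rest : List Int}, l.Pairwise (· < ·) →
      removeAlt p l = some (c, rest) → ∀ x ∈ l, p x = true → c ≤ x := by
  intro l
  induction l with
  | nil => intro c rest _ h; simp [removeAlt] at h
  | cons y ys ih =>
    intro c rest hs h x hx hpx
    by_cases hp : p y
    · simp only [removeAlt, hp, if_true, Option.some.injEq, Prod.mk.injEq] at h
      obtain ⟨rfl, rfl⟩ := h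
      rcases List.mem_cons.mp hx with rfl | hx'
      · exact le_refl x
      · exact le_of_lt ((List.pairwise_cons.mp hs).1 x hx')
    · simp only [removeAlt, hp, Bool.false_eq_true, if_false] at h
      cases hrec : removeAlt p ys with
      | none => rw [hrec] at h; simp at h
      | some cr =>
        rw [hrec] at h
        obtain ⟨c', r'⟩ := cr
        simp only [Option.some.injEq, Prod.mk.injEq] at h
        obtain ⟨rfl, rfl⟩ := h
        rcases List.mem_cons.mp hx with rfl | hx'
        · rw [hpx] at hp; exact absurd rfl hp
        · exact ih (List.pairwise_cons.mp hs).2 hrec x hx' hpx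

-- ---------- the index-level greedy loop both ports are reduced to ----------

def loopIdx (q : Int → Option String) (idxs : List Int) (last : Option String) : List Int :=
  match hrm : removeAlt (fun j => q j != last) idxs with
  | some (c, rest) => c :: loopIdx q rest (q c)
  | none =>
    match idxs with
    | [] => []
    | i :: is => i :: loopIdx q is (q i)
termination_by idxs.length
decreasing_by
  · have := removeAlt_length _ idxs c rest hrm
    omega
  · simp

-- non-dependent unfolding equations for the two loops
theorem loopA_eq (lastR : PVR) (pool : List PVR) : loopA lastR pool =
    (match removeAlt (fun c => get_primary_muscle c != get_primary_muscle lastR) pool with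
    | some (c, rest) => c :: loopA c rest
    | none =>
      match pool with
      | [] => []
      | p :: ps => p :: loopA p ps) := by
  rw [loopA]
  split
  · rename_i c rest h
    rw [h]
  · rename_i h
    cases pool with
    | nil => rfl
    | cons p ps =>
      conv_rhs => rw [h]

theorem loopIdx_eq (q : Int → Option String) (idxs : List Int) (last : Option String) :
    loopIdx q idxs last =
    (match removeAlt (fun j => q j != last) idxs with
    | some (c, rest) => c :: loopIdx q rest (q c)
    | none =>
      match idxs with
      | [] => []
      | i :: is => i :: loopIdx q is (q i)) := by
  rw [loopIdx]
  split
  · rename_i c rest h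
    rw [h]
  · rename_i h
    cases idxs with
    | nil => rfl
    | cons i is =>
      conv_rhs => rw [h]

-- ---------- A's loop computes loopIdx ----------

theorem loopA_map (q : Int → Option String) (f : Int → PVR)
    (hq : ∀ i, get_primary_muscle (f i) = q i) :
    ∀ (m : Nat) (idxs : List Int) (lastR : PVR), idxs.length ≤ m →
      loopA lastR (idxs.map f) = (loopIdx q idxs (get_primary_muscle lastR)).map f := by
  intro m
  induction m with
  | zero =>
    intro idxs lastR hlen
    have hnil : idxs = [] := List.eq_nil_of_length_eq_zero (Nat.le_zero.mp hlen)
    subst hnil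
    rw [loopA_eq, loopIdx_eq]
    simp [removeAlt]
  | succ m ih =>
    intro idxs lastR hlen
    rw [loopA_eq, loopIdx_eq]
    have hA : removeAlt (fun c => get_primary_muscle c != get_primary_muscle lastR) (idxs.map f)
        = (removeAlt (fun j => q j != get_primary_muscle lastR) idxs).map
            (fun cr => (f cr.1, cr.2.map f)) := by
      rw [removeAlt_map]
      rw [removeAlt_congr (p' := fun j => q j != get_primary_muscle lastR)
        (fun x _ => by rw [hq x])]
    rw [hA]
    cases hrm : removeAlt (fun j => q j != get_primary_muscle lastR) idxs with
    | some cr =>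
      obtain ⟨c, rest⟩ := cr
      have hlen' : rest.length ≤ m := by
        have := removeAlt_length _ idxs c rest hrm
        omega
      simp only [Option.map_some]
      rw [ih rest (f c) hlen', hq c]
      simp
    | none =>
      simp only [Option.map_none]
      cases idxs with
      | nil => rfl
      | cons i is =>
        simp only [List.map_cons]
        rw [ih is (f i) (by simpa using Nat.le_of_succ_le_succ hlen), hq i]

-- ---------- B's best-candidate fold is a running minimum over queue fronts ----------

def pvOmin (b : Option Int) (x : Int) : Option Int :=
  some (match b with | none => x | some b' => if x < b' then x else b')

def pvCands (last : Option String) (items : List (Option String × List Int)) : List Int :=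
  items.filterMap (fun pq => if pq.1 != last then pq.2.head? else none)

theorem bestFold_eq (last : Option String) :
    ∀ (items : List (Option String × List Int)) (b0 : Option Int),
      items.foldl (fun best pq =>
        if pq.1 != last then
          match pq.2, best with
          | q0 :: _, none => some q0
          | q0 :: _, some b => if q0 < b then some q0 else some b
          | [], _ => best
        else best) b0
      = (pvCands last items).foldl pvOmin b0 := by
  intro items
  induction items with
  | nil => intro b0; rfl
  | cons pq t ih =>
    intro b0
    obtain ⟨k, v⟩ := pq
    simp only [List.foldl_cons, pvCands, List.filterMap_cons]
    by_cases hk : (k != last) = true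
    · simp only [hk, if_true]
      cases v with
      | nil => simp only [List.head?_nil]; exact ih b0
      | cons q0 qt =>
        simp only [List.head?_cons, List.foldl_cons]
        have harm : (match q0 :: qt, b0 with
          | q0 :: _, none => some q0
          | q0 :: _, some b => if q0 < b then some q0 else some b
          | [], _ => b0) = pvOmin b0 q0 := by
          cases b0 with
          | none => rfl
          | some b => by_cases h : q0 < b <;> simp [pvOmin, h]
        rw [harm]
        exact ih (pvOmin b0 q0)
    · simp only [hk, if_false, Bool.false_eq_true]
      exact ih b0

theorem pvBestFold_eq (last : Option String) (items : List (Option String × List Int)) :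
    pvBestFold last items = (pvCands last items).foldl pvOmin none :=
  bestFold_eq last items none

theorem omin_fold_some :
    ∀ (l : List Int) (b0 : Option Int) (c : Int), l.foldl pvOmin b0 = some c →
      (c ∈ l ∨ b0 = some c) ∧ (∀ x ∈ l, c ≤ x) ∧ (∀ b, b0 = some b → c ≤ b) := by
  intro l
  induction l with
  | nil =>
    intro b0 c h
    simp only [List.foldl_nil] at h
    exact ⟨Or.inr h, by simp, fun b hb => by rw [hb] at h; simp at h; omega⟩
  | cons x t ih =>
    intro b0 c h
    simp only [List.foldl_cons] at h
    obtain ⟨hmem, hub, hinit⟩ := ih (pvOmin b0 x) c h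
    have hv : ∀ b, pvOmin b0 x = some b → b ≤ x ∧ (∀ b', b0 = some b' → b ≤ b') := by
      intro b hb
      cases b0 with
      | none => simp [pvOmin] at hb; subst hb; exact ⟨le_refl x, by simp⟩
      | some b' =>
        simp only [pvOmin, Option.some.injEq] at hb
        constructor
        · by_cases hlt : x < b' <;> simp [hlt] at hb <;> omega
        · intro b'' hb''
          simp only [Option.some.injEq] at hb''
          subst hb''
          by_cases hlt : x < b' <;> simp [hlt] at hb <;> omega
    have hcx : c ≤ x := by
      rcases ho : pvOmin b0 x with _ | v
      · simp [pvOmin] at ho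
      · exact le_trans (hinit v ho) (hv v ho).1
    refine ⟨?_, ?_, ?_⟩
    · rcases hmem with hm | him
      · exact Or.inl (by simp [hm])
      · cases b0 with
        | none => simp [pvOmin] at him; exact Or.inl (by simp [him])
        | some b' =>
          simp only [pvOmin, Option.some.injEq] at him
          by_cases hlt : x < b' <;> simp [hlt] at him
          · exact Or.inl (by simp [him])
          · exact Or.inr (by rw [him])
    · intro y hy
      rcases List.mem_cons.mp hy with rfl | hy'
      · exact hcx
      · exact hub y hy'
    · intro b hb
      rcases ho : pvOmin b0 x with _ | v
      · simp [pvOmin] at ho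
      · exact le_trans (hinit v ho) ((hv v ho).2 b hb)

theorem omin_fold_isSome : ∀ (l : List Int) (b0 : Option Int), l ≠ [] ∨ b0.isSome →
    (l.foldl pvOmin b0).isSome := by
  intro l
  induction l with
  | nil =>
    intro b0 h
    rcases h with h | h
    · exact absurd rfl h
    · simpa using h
  | cons x t ih =>
    intro b0 _
    simp only [List.foldl_cons]
    exact ih (pvOmin b0 x) (Or.inr (by simp [pvOmin]))

-- ---------- sorted-list minimum facts ----------

theorem sorted_min_head : ∀ {m : List Int} {c : Int}, m.Pairwise (· < ·) → c ∈ m →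
    (∀ x ∈ m, c ≤ x) → m = c :: m.tail := by
  intro m c hs hc hmin
  cases m with
  | nil => simp at hc
  | cons h t =>
    rcases List.mem_cons.mp hc with rfl | hc'
    · rfl
    · have h1 : h < c := (List.pairwise_cons.mp hs).1 c hc'
      have h2 : c ≤ h := hmin h (by simp)
      omega

theorem filter_min_cons {idxs : List Int} {P : Int → Bool} {c : Int}
    (hs : idxs.Pairwise (· < ·)) (hc : c ∈ idxs) (hPc : P c = true)
    (hmin : ∀ x ∈ idxs, P x = true → c ≤ x) :
    idxs.filter P = c :: (idxs.filter P).tail :=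
  sorted_min_head (hs.filter P) (List.mem_filter.mpr ⟨hc, hPc⟩)
    (fun x hx => hmin x (List.mem_filter.mp hx).1 (List.mem_filter.mp hx).2)

-- ---------- the invariant tying B's queues to the remaining index list ----------

def InvQ (q : Int → Option String) (idxs : List Int)
    (Q : PySem.Dict (Option String) (List Int)) : Prop :=
  idxs.Pairwise (· < ·) ∧ Q.keys.Nodup ∧
    ∀ p, Q.getD p [] = idxs.filter (fun i => q i == p)

theorem cands_mem {q : Int → Option String} {idxs : List Int}
    {Q : PySem.Dict (Option String) (List Int)} {last : Option String}
    (hInv : InvQ q idxs Q) :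
    ∀ x ∈ pvCands last Q.items, x ∈ idxs ∧ q x ≠ last := by
  obtain ⟨hs, hnd, hget⟩ := hInv
  intro x hx
  obtain ⟨pq, hpq, hsome⟩ := List.mem_filterMap.mp hx
  obtain ⟨k, v⟩ := pq
  by_cases hk : (k != last) = true
  · simp only [hk, if_true] at hsome
    have hv : v = Q.getD k [] := (PySem.Dict.getD_of_mem_items _ hpq hnd []).symm
    rw [hget k] at hv
    have hxv : x ∈ v := by
      cases v with
      | nil => simp at hsome
      | cons a t => simp at hsome; simp [hsome]
    rw [hv] at hxv
    obtain ⟨hxi, hqx⟩ := List.mem_filter.mp hxv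
    have : q x = k := by simpa using hqx
    subst this
    exact ⟨hxi, by simpa using hk⟩
  · simp [hk] at hsome

theorem mem_key_exists {q : Int → Option String} {idxs : List Int}
    {Q : PySem.Dict (Option String) (List Int)}
    (hInv : InvQ q idxs Q) {i : Int} (hi : i ∈ idxs) :
    (q i, idxs.filter (fun j => q j == q i)) ∈ Q.items := by
  obtain ⟨hs, hnd, hget⟩ := hInv
  have hne : Q.getD (q i) [] ≠ [] := by
    rw [hget]
    intro h
    have : i ∈ idxs.filter (fun j => q j == q i) := List.mem_filter.mpr ⟨hi, by simp⟩
    rw [h] at this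
    simp at this
  have hcon : Q.contains (q i) = true := by
    cases hc : Q.contains (q i) with
    | false => exact absurd (PySem.Dict.getD_of_not_contains Q [] hc) hne
    | true => rfl
  have hkeys : q i ∈ Q.keys := (PySem.Dict.contains_iff_mem_keys Q (q i)).mp hcon
  have : q i ∈ Q.items.map (·.1) := by
    simpa [PySem.Dict.keys] using hkeys
  obtain ⟨pq, hpq, hfst⟩ := List.mem_map.mp this
  obtain ⟨k, v⟩ := pq
  simp only at hfst
  subst hfst
  have hv : v = Q.getD (q i) [] := (PySem.Dict.getD_of_mem_items _ hpq hnd []).symm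
  rw [hget] at hv
  rw [← hv]
  exact hpq

-- ---------- each step: B's chosen index = A's chosen index ----------

theorem best_eq {q : Int → Option String} {idxs : List Int}
    {Q : PySem.Dict (Option String) (List Int)} {last : Option String}
    (hInv : InvQ q idxs Q) (hne : idxs ≠ []) :
    (match pvBestFold last Q.items with
     | some b => b
     | none => (Q.getD last []).headD 0)
    = (match removeAlt (fun j => q j != last) idxs with
       | some (c, _) => c
       | none => idxs.headD 0) := by
  obtain ⟨hs, hnd, hget⟩ := hInv
  rw [pvBestFold_eq]
  cases hrm : removeAlt (fun j => q j != last) idxs with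
  | some cr =>
    obtain ⟨c, rest⟩ := cr
    obtain ⟨hcmem, hpc, _⟩ := removeAlt_some_spec _ hrm
    have hmin := removeAlt_some_min hs hrm
    have hc_in : c ∈ pvCands last Q.items := by
      apply List.mem_filterMap.mpr
      refine ⟨(q c, idxs.filter (fun j => q j == q c)),
        mem_key_exists ⟨hs, hnd, hget⟩ hcmem, ?_⟩
      simp only [hpc, if_true]
      rw [filter_min_cons hs hcmem (by simp)
        (fun x hx hqx => hmin x hx (by rw [show q x = q c by simpa using hqx]; exact hpc))]
      rfl
    have hub : ∀ x ∈ pvCands last Q.items, c ≤ x := by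
      intro x hx
      obtain ⟨hxi, hxl⟩ := cands_mem ⟨hs, hnd, hget⟩ x hx
      exact hmin x hxi (by simpa using hxl)
    cases hbf : (pvCands last Q.items).foldl pvOmin none with
    | none =>
      exfalso
      have := omin_fold_isSome (pvCands last Q.items) none
        (Or.inl (by intro h; rw [h] at hc_in; simp at hc_in))
      rw [hbf] at this
      simp at this
    | some mval =>
      obtain ⟨hmm, hmub, _⟩ := omin_fold_some _ _ _ hbf
      have h1 : c ≤ mval := by
        rcases hmm with hm | hm
        · exact hub mval hm
        · simp at hm
      have h2 : mval ≤ c := hmub c hc_in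
      simp only []
      omega
  | none =>
    have hall := (removeAlt_none_iff _).mp hrm
    have hcands : pvCands last Q.items = [] := by
      apply List.eq_nil_iff_forall_not_mem.mpr
      intro x hx
      obtain ⟨hxi, hxl⟩ := cands_mem ⟨hs, hnd, hget⟩ x hx
      have := hall x hxi
      simp at this
      exact hxl this
    rw [hcands]
    simp only [List.foldl_nil]
    rw [hget last]
    have : idxs.filter (fun i => q i == last) = idxs :=
      List.filter_eq_self.mpr (fun a ha => by
        have := hall a ha
        simp at this
        simp [this])
    rw [this]

-- ---------- each step: consuming the chosen index preserves the invariant ----------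

theorem inv_step {q : Int → Option String} {idxs : List Int}
    {Q : PySem.Dict (Option String) (List Int)}
    (hInv : InvQ q idxs Q) {c : Int} (hc : c ∈ idxs)
    (hmin : ∀ x ∈ idxs, q x = q c → c ≤ x) :
    InvQ q (idxs.erase c) (Q.modify (q c) [] (List.drop 1)) := by
  obtain ⟨hs, hnd, hget⟩ := hInv
  have hcon : Q.contains (q c) = true := by
    cases hcc : Q.contains (q c) with
    | false =>
      exfalso
      have h0 := PySem.Dict.getD_of_not_contains Q ([] : List Int) hcc
      rw [hget] at h0
      have : c ∈ idxs.filter (fun i => q i == q c) := List.mem_filter.mpr ⟨hc, by simp⟩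
      rw [h0] at this
      simp at this
    | true => rfl
  refine ⟨List.Pairwise.sublist (List.erase_sublist) hs, ?_, ?_⟩
  · rw [PySem.Dict.keys_modify, PySem.Dict.keys_insert_of_contains Q _ hcon]
    exact hnd
  · intro p
    rw [PySem.Dict.getD_modify]
    by_cases hp : p = q c
    · subst hp
      rw [if_pos rfl, hget]
      rw [filter_min_cons hs hc (by simp)
        (fun x hx hqx => hmin x hx (by simpa using hqx))]
      rw [List.drop_one]
      rw [← List.erase_filter, filter_min_cons hs hc (by simp)
        (fun x hx hqx => hmin x hx (by simpa using hqx))]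
      simp
    · rw [if_neg hp, hget]
      have hnm : c ∉ idxs.filter (fun i => q i == p) := by
        intro hmem
        obtain ⟨_, hq⟩ := List.mem_filter.mp hmem
        exact hp (eq_of_beq hq).symm
      rw [← List.erase_filter, List.erase_of_not_mem hnm]

-- ---------- B's main loop computes loopIdx ----------

theorem loopB_eq (rs : List PVR) (prims : List (Option String)) :
    ∀ (m : Nat) (idxs : List Int) (Q : PySem.Dict (Option String) (List Int))
      (last : Option String) (acc : List PVR),
      InvQ (fun i => PySem.List.pyGetD prims i none) idxs Q → idxs.length = m →
      pvLoopB rs prims m (Q, last, acc)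
        = acc ++ (loopIdx (fun i => PySem.List.pyGetD prims i none) idxs last).map
            (fun i => PySem.List.pyGetD rs i []) := by
  intro m
  induction m with
  | zero =>
    intro idxs Q last acc hInv hlen
    have hnil : idxs = [] := List.eq_nil_of_length_eq_zero hlen
    subst hnil
    rw [loopIdx_eq]
    simp [pvLoopB, removeAlt]
  | succ m ih =>
    intro idxs Q last acc hInv hlen
    have hne : idxs ≠ [] := by intro h; rw [h] at hlen; simp at hlen
    have hs := hInv.1
    simp only [pvLoopB]
    rw [best_eq hInv hne]
    rw [loopIdx_eq]
    cases hrm : removeAlt (fun j => PySem.List.pyGetD prims j none != last) idxs with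
    | some cr =>
      obtain ⟨c, rest⟩ := cr
      obtain ⟨hcmem, hpc, hrest⟩ := removeAlt_some_spec _ hrm
      have hmin' : ∀ x ∈ idxs, PySem.List.pyGetD prims x none = PySem.List.pyGetD prims c none → c ≤ x := by
        intro x hx hqx
        exact removeAlt_some_min hs hrm x hx (by rw [hqx]; exact hpc)
      have hInv' := inv_step hInv hcmem hmin'
      have hlen' : (idxs.erase c).length = m := by
        rw [List.length_erase_of_mem hcmem]
        omega
      rw [ih (idxs.erase c) _ _ _ hInv' hlen']
      rw [hrest]
      simp
    | none =>
      cases idxs with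
      | nil => exact absurd rfl hne
      | cons i is =>
        have hmin' : ∀ x ∈ i :: is, PySem.List.pyGetD prims x none = PySem.List.pyGetD prims i none → i ≤ x := by
          intro x hx _
          rcases List.mem_cons.mp hx with rfl | hx'
          · exact le_refl x
          · exact le_of_lt ((List.pairwise_cons.mp hs).1 x hx')
        have hInv' := inv_step hInv (by simp) hmin'
        rw [List.erase_cons_head] at hInv'
        have hlen' : is.length = m := by simpa using hlen
        simp only [List.headD_cons]
        rw [ih is _ _ _ hInv' hlen']
        simp

-- ---------- the initial state of B ----------

theorem enumerate_eq {α : Type} (d : α) :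
    ∀ (l : List α) (s : Int), PySem.List.enumerate l s
      = (List.range l.length).map (fun (k : Nat) => (s + (k : Int), l.getD k d)) := by
  intro l
  induction l with
  | nil => intro s; rfl
  | cons x t ih =>
    intro s
    rw [PySem.List.enumerate_cons, ih (s + 1)]
    simp only [List.length_cons, List.range_succ_eq_map, List.map_cons, List.map_map,
      List.getD_cons_zero, Nat.cast_zero, add_zero]
    congr 1
    apply List.map_congr_left
    intro k _
    have hcast : ((Nat.succ k : Nat) : Int) = (k : Int) + 1 := by push_cast; ring
    simp only [Function.comp_apply, hcast, List.getD_cons_succ, Prod.ext_iff]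
    exact ⟨by omega, trivial⟩

theorem build_getD (prims : List (Option String)) (p : Option String) :
    ((PySem.List.enumerate prims).foldl
        (fun d ip => d.modify ip.2 [] (fun q => q ++ [ip.1])) PySem.Dict.empty).getD p []
      = ((List.range prims.length).map (fun k => ((k : Nat) : Int))).filter
          (fun i => PySem.List.pyGetD prims i none == p) := by
  have hfold : (PySem.List.enumerate prims).foldl
      (fun d ip => d.modify ip.2 [] (fun q => q ++ [ip.1])) PySem.Dict.empty
      = ((PySem.List.enumerate prims).map (fun ip => (ip.2, ip.1))).foldl
          (fun d pq => d.modify pq.1 [] (fun q => q ++ [pq.2])) PySem.Dict.empty := by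
    rw [List.foldl_map]
  rw [hfold, PySem.Dict.getD_foldl_modify_append]
  rw [enumerate_eq none prims 0]
  simp only [List.map_map, List.filter_map, PySem.Dict.getD_empty, List.nil_append,
    Function.comp_def, zero_add, PySem.List.pyGetD_natCast]

theorem build_nodup (prims : List (Option String)) :
    ((PySem.List.enumerate prims).foldl
        (fun d ip => d.modify ip.2 [] (fun q => q ++ [ip.1])) PySem.Dict.empty).keys.Nodup :=
  PySem.Dict.nodup_keys_foldl_modify_key (PySem.List.enumerate prims) (fun ip => ip.2) []
    (fun _ ip => fun q => q ++ [ip.1]) PySem.Dict.empty PySem.Dict.nodup_keys_empty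

theorem map_getD_range {α : Type} (l : List α) (d : α) :
    (List.range l.length).map (fun k => l.getD k d) = l := by
  apply List.ext_getElem
  · simp
  · intro i h1 h2
    simp [List.getD_eq_getElem?_getD, List.getElem?_eq_getElem h2]

-- ---------- assembling the equivalence ----------

theorem reorder_eq_alt (rs : List PVR) :
    reorder_by_primary_muscle rs = reorder_by_primary_muscle_alt rs := by
  cases rs with
  | nil => rfl
  | cons r rest =>
    -- abbreviations for B's initial state
    have halt : reorder_by_primary_muscle_alt (r :: rest)
        = pvLoopB (r :: rest) ((r :: rest).map get_primary_muscle) ((r :: rest).length - 1)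
            (((PySem.List.enumerate ((r :: rest).map get_primary_muscle)).foldl
                (fun d ip => d.modify ip.2 [] (fun q => q ++ [ip.1])) PySem.Dict.empty).modify
                  (((r :: rest).map get_primary_muscle).headD none) [] (List.drop 1),
             PySem.List.pyGetD ((r :: rest).map get_primary_muscle)
               ((((PySem.List.enumerate ((r :: rest).map get_primary_muscle)).foldl
                 (fun d ip => d.modify ip.2 [] (fun q => q ++ [ip.1])) PySem.Dict.empty).getD
                   (((r :: rest).map get_primary_muscle).headD none) []).headD 0) none,
             [PySem.List.pyGetD (r :: rest)
               ((((PySem.List.enumerate ((r :: rest).map get_primary_muscle)).foldl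
                 (fun d ip => d.modify ip.2 [] (fun q => q ++ [ip.1])) PySem.Dict.empty).getD
                   (((r :: rest).map get_primary_muscle).headD none) []).headD 0) []]) := rfl
    set prims := (r :: rest).map get_primary_muscle with hprims
    set Q0 := (PySem.List.enumerate prims).foldl
      (fun d ip => d.modify ip.2 [] (fun q => q ++ [ip.1])) PySem.Dict.empty with hQ0
    set p0 := prims.headD none with hp0
    set q : Int → Option String := fun i => PySem.List.pyGetD prims i none with hqdef
    set f : Int → PVR := fun i => PySem.List.pyGetD (r :: rest) i [] with hfdef
    set idxsF : List Int := (List.range (r :: rest).length).map (fun k => ((k : Nat) : Int))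
      with hidxsF
    have hlenp : prims.length = (r :: rest).length := by rw [hprims, List.length_map]
    have hInv0 : InvQ q idxsF Q0 := by
      refine ⟨?_, build_nodup prims, ?_⟩
      · rw [hidxsF]
        exact List.pairwise_map.mpr (List.pairwise_lt_range.imp (by intro a b h; exact_mod_cast h))
      · intro p
        rw [hQ0, build_getD prims p, hlenp]
    have hq0 : q 0 = p0 := by
      show PySem.List.pyGetD prims 0 none = prims.headD none
      rw [hprims]
      simp [PySem.List.pyGetD]
    have hmem0 : (0 : Int) ∈ idxsF := by
      rw [hidxsF]
      exact List.mem_map.mpr ⟨0, List.mem_range.mpr (by simp), rfl⟩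
    have hge : ∀ x ∈ idxsF, (0 : Int) ≤ x := by
      intro x hx
      rw [hidxsF] at hx
      obtain ⟨k, _, rfl⟩ := List.mem_map.mp hx
      exact Int.natCast_nonneg k
    have hfirst : ((Q0.getD p0 []).headD 0 : Int) = 0 := by
      rw [hInv0.2.2 p0]
      rw [filter_min_cons hInv0.1 hmem0 (by rw [hq0]; simp)
        (fun x hx _ => hge x hx)]
      rfl
    rw [halt, hfirst]
    have hf0 : PySem.List.pyGetD (r :: rest) (0 : Int) [] = r := by simp [PySem.List.pyGetD]
    have hInv1 : InvQ q (idxsF.erase 0) (Q0.modify p0 [] (List.drop 1)) := by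
      rw [← hq0]
      exact inv_step hInv0 hmem0 (fun x hx _ => hge x hx)
    -- the index list after consuming index 0
    have hidxsT : idxsF.erase 0
        = (List.range rest.length).map (fun k => ((Nat.succ k : Nat) : Int)) := by
      rw [hidxsF]
      simp only [List.length_cons, List.range_succ_eq_map, List.map_cons, Nat.cast_zero,
        List.map_map]
      rw [List.erase_cons_head]
      rfl
    have hlenT : (idxsF.erase 0).length = (r :: rest).length - 1 := by
      rw [hidxsT]
      simp
    have hB : pvLoopB (r :: rest) prims ((r :: rest).length - 1)
        (Q0.modify p0 [] (List.drop 1), PySem.List.pyGetD prims (0 : Int) none,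
          [PySem.List.pyGetD (r :: rest) (0 : Int) []])
        = [r] ++ (loopIdx q (idxsF.erase 0) (q 0)).map f := by
      rw [hf0]
      exact loopB_eq (r :: rest) prims _ (idxsF.erase 0) _ _ [r] hInv1 hlenT
    rw [hB]
    -- A's side
    have hqf : ∀ i, get_primary_muscle (f i) = q i := by
      intro i
      rw [hqdef, hprims, hfdef]
      rw [show (none : Option String) = get_primary_muscle [] from rfl]
      exact (PySem.List.pyGetD_map get_primary_muscle (r :: rest) i []).symm
    have hrest : (idxsF.erase 0).map f = rest := by
      rw [hidxsT, List.map_map]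
      have : (f ∘ fun k => ((Nat.succ k : Nat) : Int)) = fun k => rest.getD k [] := by
        funext k
        simp only [Function.comp_apply, hfdef, PySem.List.pyGetD_natCast, List.getD_cons_succ]
      rw [this]
      exact map_getD_range rest []
    have hlastA : get_primary_muscle r = q 0 := by
      rw [← hf0]
      exact hqf 0
    show r :: loopA r rest = [r] ++ (loopIdx q (idxsF.erase 0) (q 0)).map f
    rw [← hrest, loopA_map q f hqf ((idxsF.erase 0).length) _ r (le_refl _), hlastA]
    rfl

-- ===== VERDICT (by name: the statement is the Claim_ definition above) =====
theorem reorder_by_primary_muscle_spec : Claim_equal_reorder_by_primary_muscle := by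
  intro rs _
  unfold Spec_reorder_by_primary_muscle
  exact reorder_eq_alt rs
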